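-- pv_equiv track=rewrite | github.com/thealper2/codewars-solutions | 7-kyu/apparently_modifying_strings.py | apparently
-- ===== SOURCE A (Python) =====
-- def apparently(st):
--     words = st.split()
--     n = len(words)
--
--     for i in range(n):
--         if words[i] == 'but' or words[i] == 'and':
--             if i < n - 1 and words[i + 1] != 'apparently':
--                 words[i] = words[i] + ' apparently'
--             elif i == n - 1:
--                 words[i] = words[i] + ' apparently'
--
--     return ' '.join(words)
-- ===== SOURCE B (Python) =====
-- def apparently(st):
--     # Stage 1: emit the word stream with a tentative-insertion marker (None)
--     # after every 'but'/'and'.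
--     toks = []
--     for w in st.split():
--         toks.append(w)
--         if w in ('but', 'and'):
--             toks.append(None)
--     # Stage 2: resolve markers against the token that follows them: a marker
--     # becomes the word 'apparently' unless the next token already is it.
--     out = []
--     pending = False
--     for t in toks:
--         if t is None:
--             pending = True
--         else:
--             if pending and t != 'apparently':
--                 out.append('apparently')
--             pending = False
--             out.append(t)
--     if pending:
--         out.append('apparently')
--     return ' '.join(out)
-- ===== Notes on version B (the rewrite author's own statement) =====
-- stated objective: alternative
-- what changed: Replaced A's single forward index loop with lookahead and in-place mutation by a two-stage tentative-insertion algorithm: stage 1 emits the word stream with a marker token after every target word, stage 2 resolves each marker against the following token via a carried pending flag (a marker turns into the inserted word unless the next word already equals it).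
import Mathlib
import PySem

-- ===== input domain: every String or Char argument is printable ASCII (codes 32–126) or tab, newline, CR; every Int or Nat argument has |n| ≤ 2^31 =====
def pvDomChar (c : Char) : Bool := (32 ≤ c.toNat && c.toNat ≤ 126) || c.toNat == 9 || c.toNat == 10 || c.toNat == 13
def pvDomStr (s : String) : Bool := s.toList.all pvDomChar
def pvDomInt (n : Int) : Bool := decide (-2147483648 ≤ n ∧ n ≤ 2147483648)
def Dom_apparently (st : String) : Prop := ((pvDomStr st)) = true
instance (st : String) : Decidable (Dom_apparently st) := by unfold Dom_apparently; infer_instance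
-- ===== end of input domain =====

-- B replaces A's lookahead index loop with two staged passes: insert tentative markers, then resolve them with a carried flag (alternative; same cost).

-- ===== PORT A =====
def apparently (st : String) : String :=
  let words := PySem.Str.split₀ st
  let n := PySem.List.len words
  let words := (PySem.List.pyRange 0 n 1).foldl (fun ws i =>
    if PySem.List.pyGetD ws i "" = "but" ∨ PySem.List.pyGetD ws i "" = "and" then
      if i < n - 1 ∧ PySem.List.pyGetD ws (i + 1) "" ≠ "apparently" then
        PySem.List.pySetD ws i (PySem.List.pyGetD ws i "" ++ " apparently")
      else if i = n - 1 then
        PySem.List.pySetD ws i (PySem.List.pyGetD ws i "" ++ " apparently")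
      else ws
    else ws) words
  PySem.Str.join " " words

-- ===== PORT B =====
def apparently_alt (st : String) : String :=
  -- stage 1: word stream with a marker (none) after every 'but'/'and'
  let toks := (PySem.Str.split₀ st).foldl (fun acc w =>
    let acc := acc ++ [some w]
    if w = "but" ∨ w = "and" then acc ++ [none] else acc) ([] : List (Option String))
  -- stage 2: resolve markers against the following token via a pending flag
  let s := toks.foldl (fun (s : List String × Bool) t =>
    match t with
    | none => (s.1, true)
    | some w =>
      ((if s.2 ∧ w ≠ "apparently" then s.1 ++ ["apparently"] else s.1) ++ [w], false))
    (([] : List String), false)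
  let out := if s.2 then s.1 ++ ["apparently"] else s.1
  PySem.Str.join " " out

-- ===== PRECONDITION & SPEC =====
def Spec_apparently (st : String) (out : String) : Prop := out = apparently_alt st
instance (st : String) (out : String) : Decidable (Spec_apparently st out) := by unfold Spec_apparently; infer_instance

-- ===== CLAIM (what is proved, stated in full; the proofs are below) =====
def Claim_equal_apparently : Prop := ∀ (st : String), Dom_apparently st → Spec_apparently st (apparently st)

-- ===== LEMMAS AND PROOFS =====

-- the marking of one word given its optional successor (A's per-word effect)
def pvMarkW (w : String) (nxt : Option String) : String :=
  if (w = "but" ∨ w = "and") ∧ nxt ≠ some "apparently" then w ++ " apparently" else w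

-- A's whole transformation of the word list, recursively
def pvA : List String → List String
  | [] => []
  | w :: t => pvMarkW w t.head? :: pvA t

-- A's step function, with the total word count n fixed
def pvStep (n : Int) (ws : List String) (i : Int) : List String :=
  if PySem.List.pyGetD ws i "" = "but" ∨ PySem.List.pyGetD ws i "" = "and" then
    if i < n - 1 ∧ PySem.List.pyGetD ws (i + 1) "" ≠ "apparently" then
      PySem.List.pySetD ws i (PySem.List.pyGetD ws i "" ++ " apparently")
    else if i = n - 1 then
      PySem.List.pySetD ws i (PySem.List.pyGetD ws i "" ++ " apparently")
    else ws
  else ws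

lemma pvGetD_append_mid (pre t : List String) (w d : String) :
    PySem.List.pyGetD (pre ++ w :: t) (pre.length : Int) d = w := by
  simp [PySem.List.pyGetD_natCast, List.getD]

lemma pvGetD_append_succ (pre t : List String) (w d : String) :
    PySem.List.pyGetD (pre ++ w :: t) ((pre.length : Int) + 1) d = t.getD 0 d := by
  have : ((pre.length : Int) + 1) = ((pre.length + 1 : Nat) : Int) := by push_cast; ring
  rw [this, PySem.List.pyGetD_natCast]
  cases t <;> simp [List.getD]

lemma pvSetD_append_mid (pre t : List String) (w v : String) :
    PySem.List.pySetD (pre ++ w :: t) (pre.length : Int) v = pre ++ v :: t := by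
  simp [PySem.List.pySetD_natCast]

-- loop invariant: folding A's step over the remaining indices applies the marking to the suffix
lemma pvFold_eq (rest : List String) : ∀ (pre : List String),
    (PySem.List.pyRange (pre.length : Int) ((pre.length + rest.length : Nat) : Int) 1).foldl
      (pvStep ((pre.length + rest.length : Nat) : Int)) (pre ++ rest)
    = pre ++ pvA rest := by
  induction rest with
  | nil =>
    intro pre
    rw [PySem.List.pyRange_one_eq_nil (by simp)]
    simp [pvA]
  | cons w t ih =>
    intro pre
    have hlt : (pre.length : Int) < ((pre.length + (w :: t).length : Nat) : Int) := by
      simp only [List.length_cons]; push_cast; omega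
    rw [PySem.List.pyRange_one_cons hlt]
    have hstep : pvStep ((pre.length + (w :: t).length : Nat) : Int) (pre ++ w :: t) (pre.length : Int)
        = (pre ++ [pvMarkW w t.head?]) ++ t := by
      unfold pvStep pvMarkW
      rw [pvGetD_append_mid, pvGetD_append_succ, pvSetD_append_mid]
      have hn : (pre.length : Int) < ((pre.length + (w :: t).length : Nat) : Int) - 1 ↔ t ≠ [] := by
        cases t with
        | nil => simp
        | cons a b => simp only [List.length_cons, ne_eq, reduceCtorEq, not_false_eq_true, iff_true]; push_cast; omega
      have hn2 : ((pre.length : Int) = ((pre.length + (w :: t).length : Nat) : Int) - 1) ↔ t = [] := by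
        cases t with
        | nil => simp only [List.length_cons]; simp
        | cons a b => simp only [List.length_cons]; push_cast; simp; omega
      cases t with
      | nil => simp only [hn, hn2]; split_ifs <;> simp_all
      | cons v t' =>
        simp only [hn, hn2, List.head?_cons, List.getD]
        split_ifs <;> simp_all
    rw [List.foldl_cons, hstep]
    have harith : (pre.length : Int) + 1 = (((pre ++ [pvMarkW w t.head?]).length : Nat) : Int) := by
      simp
    have hlen : ((pre.length + (w :: t).length : Nat) : Int)
        = (((pre ++ [pvMarkW w t.head?]).length + t.length : Nat) : Int) := by
      push_cast; simp; omega
    rw [harith, hlen, ih (pre ++ [pvMarkW w t.head?])]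
    simp [pvA]

-- ===== B-side machinery =====

-- stage 1's encoding of one word
def pvEnc (w : String) : List (Option String) :=
  if w = "but" ∨ w = "and" then [some w, none] else [some w]

-- B's resulting word list, recursively (marked words become TWO list entries)
def pvB2 : List String → List String
  | [] => []
  | w :: t =>
    (if (w = "but" ∨ w = "and") ∧ t.head? ≠ some "apparently"
     then [w, "apparently"] else [w]) ++ pvB2 t

-- stage 2's step and finalisation
def pvStep2 (s : List String × Bool) (t : Option String) : List String × Bool :=
  match t with
  | none => (s.1, true)
  | some w =>
    ((if s.2 ∧ w ≠ "apparently" then s.1 ++ ["apparently"] else s.1) ++ [w], false)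

def pvFin (s : List String × Bool) : List String :=
  if s.2 then s.1 ++ ["apparently"] else s.1

lemma pvStage1_eq (ws : List String) : ∀ (acc : List (Option String)),
    ws.foldl (fun acc w =>
      let acc := acc ++ [some w]
      if w = "but" ∨ w = "and" then acc ++ [none] else acc) acc
    = acc ++ ws.flatMap pvEnc := by
  induction ws with
  | nil => intro acc; simp
  | cons w t ih =>
    intro acc
    simp only [List.foldl_cons, List.flatMap_cons, ih]
    unfold pvEnc
    split_ifs <;> simp

lemma pvStage2_eq (ws : List String) : ∀ (out : List String) (pending : Bool),
    pvFin ((ws.flatMap pvEnc).foldl pvStep2 (out, pending))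
    = out ++ (if pending ∧ ws.head? ≠ some "apparently" then ["apparently"] else []) ++ pvB2 ws := by
  induction ws with
  | nil =>
    intro out pending
    cases pending <;> simp [pvFin, pvB2]
  | cons w t ih =>
    intro out pending
    simp only [List.flatMap_cons, List.append_assoc, List.foldl_append]
    by_cases hw : w = "but" ∨ w = "and"
    · have hwa : w ≠ "apparently" := by rcases hw with h | h <;> simp [h]
      simp only [pvEnc, if_pos hw, List.foldl_cons, List.foldl_nil, pvStep2]
      rw [ih]
      cases pending <;>
        simp [pvB2, hw, hwa, List.head?_cons] <;> split_ifs <;> simp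
    · simp only [pvEnc, if_neg hw, List.foldl_cons, List.foldl_nil, pvStep2]
      rw [ih]
      have hmark : pvB2 (w :: t) = [w] ++ pvB2 t := by
        simp [pvB2, hw]
      rw [hmark]
      by_cases hp : pending = true ∧ w ≠ "apparently" <;>
        cases pending <;> simp_all [List.head?_cons]

-- joining B's two-entry marking gives the same string as joining A's concatenated marking
lemma pvJoin_eq (ws : List String) :
    PySem.Chars.join (" ".toList) ((pvB2 ws).map String.toList)
    = PySem.Chars.join (" ".toList) ((pvA ws).map String.toList) := by
  induction ws with
  | nil => simp [pvA, pvB2]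
  | cons w t ih =>
    by_cases hc : (w = "but" ∨ w = "and") ∧ t.head? ≠ some "apparently"
    · simp only [pvA, pvB2, pvMarkW, if_pos hc]
      cases ht : pvB2 t with
      | nil =>
        have ht' : pvA t = [] := by
          cases t with
          | nil => simp [pvA]
          | cons a b => simp [pvB2] at ht; split_ifs at ht <;> simp_all
        simp [ht', PySem.Chars.join_cons_cons, PySem.Chars.join_singleton]
      | cons b r =>
        have ht' : ∃ b' r', pvA t = b' :: r' := by
          cases t with
          | nil => simp [pvB2] at ht
          | cons a b => exact ⟨_, _, rfl⟩
        obtain ⟨b', r', hA⟩ := ht'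
        have h2 := ih
        rw [ht, hA] at h2
        rw [hA]
        simp only [List.cons_append, List.nil_append, List.map_cons,
          PySem.Chars.join_cons_cons] at h2 ⊢
        simp [List.append_assoc]
        simpa using h2
    · simp only [pvA, pvB2, pvMarkW, if_neg hc]
      cases ht : pvB2 t with
      | nil =>
        have ht' : pvA t = [] := by
          cases t with
          | nil => simp [pvA]
          | cons a b => simp [pvB2] at ht; split_ifs at ht <;> simp_all
        simp [ht, ht', PySem.Chars.join_singleton] at ih ⊢
      | cons b r =>
        have ht' : ∃ b' r', pvA t = b' :: r' := by
          cases t with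
          | nil => simp [pvB2] at ht
          | cons a b => exact ⟨_, _, rfl⟩
        obtain ⟨b', r', hA⟩ := ht'
        have h2 := ih
        rw [ht, hA] at h2
        rw [hA]
        simp only [List.map_cons, PySem.Chars.join_cons_cons, List.cons_append,
          List.nil_append] at h2 ⊢
        simpa using h2

-- ===== VERDICT (by name: the statement is the Claim_ definition above) =====
theorem apparently_spec : Claim_equal_apparently := by
  intro st _
  show apparently st = apparently_alt st
  have hA : apparently st = PySem.Str.join " " (pvA (PySem.Str.split₀ st)) := by
    unfold apparently
    simp only [PySem.List.len_eq]
    have h := pvFold_eq (PySem.Str.split₀ st) []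
    simp only [List.nil_append, List.length_nil, Nat.zero_add, Nat.cast_zero] at h
    unfold pvStep at h
    exact congrArg (PySem.Str.join " ") h
  have hB : apparently_alt st = PySem.Str.join " " (pvB2 (PySem.Str.split₀ st)) := by
    unfold apparently_alt
    have h1 := pvStage1_eq (PySem.Str.split₀ st) []
    simp only [List.nil_append] at h1
    rw [h1]
    have h2 := pvStage2_eq (PySem.Str.split₀ st) [] false
    simp only [Bool.false_eq_true, false_and, if_false, List.nil_append] at h2
    unfold pvFin pvStep2 at h2
    exact congrArg (PySem.Str.join " ") h2
  rw [hA, hB]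
  apply String.toList_inj.mp
  simp only [PySem.Str.toList_join]
  exact (pvJoin_eq (PySem.Str.split₀ st)).symm
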